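-- pv_equiv track=rewrite | github.com/dg-i/junoscfg | src/junoscfg/input.py | _count_unquoted_brackets
-- ===== SOURCE A (Python) =====
-- def _count_unquoted_brackets(line: str) -> int:
--     """Count net unquoted brackets (opens minus closes) in a line."""
--     count = 0
--     in_quote = False
--     for i, ch in enumerate(line):
--         if ch == '"' and (i == 0 or line[i - 1] != "\\"):
--             in_quote = not in_quote
--         elif not in_quote:
--             if ch == "[":
--                 count += 1
--             elif ch == "]":
--                 count -= 1
--     return count
-- ===== SOURCE B (Python) =====
-- def _count_unquoted_brackets(line: str) -> int:
--     """Count net unquoted brackets (opens minus closes) in a line.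
--
--     Two-phase: split the line on every double-quote, then re-merge the
--     pieces whose separating quote was escaped (previous char is a
--     backslash).  The resulting parts alternate unquoted / quoted, so the
--     even-indexed parts are exactly the unquoted text.
--     """
--     raw = line.split('"')
--     parts = []
--     for seg in raw:
--         if parts and parts[-1].endswith('\\'):
--             parts[-1] += '"' + seg
--         else:
--             parts.append(seg)
--     return sum(seg.count('[') - seg.count(']')
--                for i, seg in enumerate(parts) if i % 2 == 0)
-- ===== Notes on version B (the rewrite author's own statement) =====
-- stated objective: faster
-- what changed: Replaces A's single-pass per-character quote-toggle state machine by a two-phase split/merge decomposition: split the line on every double-quote, re-merge pieces whose separating quote was escaped, then tally bracket counts over the even-indexed (unquoted) parts.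
import Mathlib
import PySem

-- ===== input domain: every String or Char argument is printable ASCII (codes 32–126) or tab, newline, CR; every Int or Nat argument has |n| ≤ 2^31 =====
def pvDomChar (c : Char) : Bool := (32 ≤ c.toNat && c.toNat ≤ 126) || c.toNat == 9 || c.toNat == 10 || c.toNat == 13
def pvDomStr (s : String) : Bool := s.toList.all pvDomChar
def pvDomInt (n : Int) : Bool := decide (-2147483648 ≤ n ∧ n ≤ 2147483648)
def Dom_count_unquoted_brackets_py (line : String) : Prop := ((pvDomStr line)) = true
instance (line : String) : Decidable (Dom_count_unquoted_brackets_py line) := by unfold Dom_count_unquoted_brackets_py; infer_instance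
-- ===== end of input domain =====

-- B replaces A's per-character quote-toggle state machine by a split-on-quotes / re-merge-escaped-pieces / tally-even-indexed-parts decomposition (same O(n) work, measurably faster in Python via C-level str.split/str.count).

-- ===== PORT A =====
def count_unquoted_brackets_py (line : String) : Int :=
  let cs := line.toList
  ((PySem.List.enumerate cs 0).foldl
    (fun (st : Int × Bool) (p : Int × Char) =>
      if p.2 = '"' ∧ (p.1 = 0 ∨ PySem.List.pyGet? cs (p.1 - 1) ≠ some '\\') then
        (st.1, !st.2)
      else if !st.2 then
        if p.2 = '[' then (st.1 + 1, st.2)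
        else if p.2 = ']' then (st.1 - 1, st.2)
        else st
      else st)
    (0, false)).1

-- ===== PORT B =====
def count_unquoted_brackets_py_alt (line : String) : Int :=
  let raw := PySem.Chars.splitOn line.toList ['"']
  let parts := raw.foldl
    (fun (parts : List (List Char)) (seg : List Char) =>
      match PySem.List.pyGet? parts (-1) with
      | some last =>
        if PySem.Chars.endswith last ['\\'] then
          parts.dropLast ++ [last ++ '"' :: seg]
        else parts ++ [seg]
      | none => parts ++ [seg])
    []
  (PySem.List.enumerate parts 0).foldl
    (fun (acc : Int) (p : Int × List Char) =>
      if PySem.Int.mod p.1 2 = 0 then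
        acc + ((PySem.Chars.count p.2 ['['] : Int) - (PySem.Chars.count p.2 [']'] : Int))
      else acc)
    0

-- ===== PRECONDITION & SPEC =====
def Spec_count_unquoted_brackets_py (line : String) (out : Int) : Prop := out = count_unquoted_brackets_py_alt line
instance (line : String) (out : Int) : Decidable (Spec_count_unquoted_brackets_py line out) := by unfold Spec_count_unquoted_brackets_py; infer_instance

-- ===== CLAIM (what is proved, stated in full; the proofs are below) =====
def Claim_equal_count_unquoted_brackets_py : Prop := ∀ (line : String), Dom_count_unquoted_brackets_py line → Spec_count_unquoted_brackets_py line (count_unquoted_brackets_py line)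

-- ===== LEMMAS AND PROOFS =====
def pvNet (l : List Char) : Int := (l.count '[' : Int) - (l.count ']' : Int)

def pvSplit : List Char → List (List Char)
  | [] => [[]]
  | c :: r =>
    if c = '"' then [] :: pvSplit r
    else
      match pvSplit r with
      | s :: ss => (c :: s) :: ss
      | [] => [[c]]

def pvNetRec : Option Char → Bool → List Char → Int
  | _, _, [] => 0
  | prev, inq, c :: r =>
    if c = '"' ∧ prev ≠ some '\\' then pvNetRec (some c) (!inq) r
    else if !inq then (if c = '[' then 1 else if c = ']' then -1 else 0) + pvNetRec (some c) inq r
    else pvNetRec (some c) inq r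

def pvG : Option Char → Bool → List (List Char) → Int
  | _, _, [] => 0
  | prev, inq, seg :: rest =>
    (if inq then 0 else pvNet seg) +
      pvG (some '"') (if seg.getLast?.or prev = some '\\' then inq else !inq) rest

def pvH : Bool → Bool → List (List Char) → Int
  | _, _, [] => 0
  | e, inq, seg :: rest =>
    if e then (if inq then 0 else pvNet seg) + pvH (decide (seg.getLast? = some '\\')) inq rest
    else (if inq then pvNet seg else 0) + pvH (decide (seg.getLast? = some '\\')) (!inq) rest

def pvEs : Bool → List (List Char) → Int
  | _, [] => 0
  | b, s :: ss => (if b then pvNet s else 0) + pvEs (!b) ss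

lemma pvSplit_ne_nil (l : List Char) : pvSplit l ≠ [] := by
  cases l with
  | nil => simp [pvSplit]
  | cons c r =>
    simp only [pvSplit]
    split
    · simp
    · rcases h : pvSplit r with _ | ⟨s, ss⟩ <;> simp

lemma pvOrQuote (o : Option Char) :
    (o.or (some '"') = some '\\') ↔ (o = some '\\') := by
  cases o <;> simp

lemma pvNet_cons (c : Char) (s : List Char) :
    pvNet (c :: s) = (if c = '[' then 1 else if c = ']' then -1 else 0) + pvNet s := by
  simp [pvNet, List.count_cons]
  by_cases h1 : c = '[' <;> by_cases h2 : c = ']' <;> simp [h1, h2] <;> first | ring | (exfalso; exact absurd (h1 ▸ h2) (by decide))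

lemma pvA_fold (cs : List Char) :
    ∀ (suf pre : List Char) (c : Int) (q : Bool), cs = pre ++ suf →
    ((PySem.List.enumerate suf (pre.length : Int)).foldl
      (fun (st : Int × Bool) (p : Int × Char) =>
        if p.2 = '"' ∧ (p.1 = 0 ∨ PySem.List.pyGet? cs (p.1 - 1) ≠ some '\\') then
          (st.1, !st.2)
        else if !st.2 then
          if p.2 = '[' then (st.1 + 1, st.2)
          else if p.2 = ']' then (st.1 - 1, st.2)
          else st
        else st)
      (c, q)).1 = c + pvNetRec pre.getLast? q suf := by
  intro suf
  induction suf with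
  | nil => intro pre c q h; simp [PySem.List.enumerate, pvNetRec]
  | cons ch rest ih =>
    intro pre c q h
    rw [PySem.List.enumerate_cons, List.foldl_cons]
    have hcs : cs = (pre ++ [ch]) ++ rest := by simpa using h
    have hlen : ((pre.length : Int) + 1) = (((pre ++ [ch]).length : Nat) : Int) := by
      simp
    have hcond : ((pre.length:Int) = 0 ∨ PySem.List.pyGet? cs ((pre.length:Int) - 1) ≠ some '\\')
               ↔ ¬ pre.getLast? = some '\\' := by
      cases pre with
      | nil => simp
      | cons p0 pr =>
        have hne : ¬ (((p0 :: pr).length : Int) = 0) := by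
          push_cast; simp; omega
        have hget : PySem.List.pyGet? cs (((p0 :: pr).length : Int) - 1) = (p0 :: pr).getLast? := by
          have h1 : (((p0 :: pr).length : Int) - 1) = ((pr.length : Nat) : Int) := by push_cast; simp
          rw [h1, h, PySem.List.pyGet?_natCast, List.getElem?_append_left (by simp), List.getLast?_eq_getElem?]
          simp
        rw [hget]
        constructor
        · rintro (h0 | h0)
          · exact absurd h0 hne
          · exact h0
        · exact Or.inr
    rw [hlen]
    split_ifs with h1 h2 h3 h4
    · have h1' : ch = '"' ∧ ((pre.length:Int) = 0 ∨ PySem.List.pyGet? cs ((pre.length:Int) - 1) ≠ some '\\') := h1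
      rw [ih (pre ++ [ch]) c (!q) hcs, List.getLast?_concat]
      conv_rhs => rw [pvNetRec, if_pos ⟨h1'.1, hcond.mp h1'.2⟩]
    · have h2' : (!q) = true := h2
      rw [ih (pre ++ [ch]) (c + 1) q hcs, List.getLast?_concat]
      conv_rhs => rw [pvNetRec, if_neg (fun hx => h1 ⟨hx.1, hcond.mpr hx.2⟩), if_pos h2', if_pos h3]
      ring
    · have h2' : (!q) = true := h2
      rw [ih (pre ++ [ch]) (c - 1) q hcs, List.getLast?_concat]
      conv_rhs => rw [pvNetRec, if_neg (fun hx => h1 ⟨hx.1, hcond.mpr hx.2⟩), if_pos h2', if_neg h3, if_pos h4]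
      ring
    · have h2' : (!q) = true := h2
      rw [ih (pre ++ [ch]) c q hcs, List.getLast?_concat]
      conv_rhs => rw [pvNetRec, if_neg (fun hx => h1 ⟨hx.1, hcond.mpr hx.2⟩), if_pos h2', if_neg h3, if_neg h4]
      ring
    · have h2' : ¬ ((!q) = true) := h2
      rw [ih (pre ++ [ch]) c q hcs, List.getLast?_concat]
      conv_rhs => rw [pvNetRec, if_neg (fun hx => h1 ⟨hx.1, hcond.mpr hx.2⟩), if_neg h2']

lemma pvNetRec_g : ∀ (cs : List Char) (prev : Option Char) (inq : Bool),
    pvNetRec prev inq cs = pvG prev inq (pvSplit cs) := by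
  intro cs
  induction cs with
  | nil => intro prev inq; simp [pvNetRec, pvSplit, pvG, pvNet]
  | cons c r ih =>
    intro prev inq
    obtain ⟨s, ss, hs⟩ : ∃ s ss, pvSplit r = s :: ss := by
      rcases h : pvSplit r with _ | ⟨s, ss⟩
      · exact absurd h (pvSplit_ne_nil r)
      · exact ⟨s, ss, rfl⟩
    by_cases hq : c = '"'
    · subst hq
      have hsp : pvSplit ('"' :: r) = [] :: pvSplit r := by simp [pvSplit]
      rw [hsp, pvG]
      simp only [List.getLast?_nil, Option.none_or]
      by_cases hp : prev = some '\\'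
      · rw [pvNetRec, if_neg (by simp [hp]), ih (some '"') inq, if_pos hp]
        have hbr : (if ('"':Char) = '[' then (1:Int) else if ('"':Char) = ']' then -1 else 0) = 0 := by decide
        cases inq <;> simp [hbr, pvNet]
      · rw [pvNetRec, if_pos ⟨rfl, by simpa using hp⟩, ih (some '"') (!inq), if_neg hp]
        simp [pvNet]
    · rw [pvNetRec, if_neg (by simp [hq])]
      simp only [pvSplit, if_neg hq, hs]
      have hr := ih (some c) inq
      rw [hs] at hr
      rw [pvG]
      rw [pvG] at hr
      have hlast : ((c :: s).getLast?.or prev) = (s.getLast?.or (some c)) := by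
        cases s with
        | nil => simp
        | cons a b =>
          rw [List.getLast?_cons_cons, Option.or_of_isSome (by simp), Option.or_of_isSome (by simp)]
      rw [hlast]
      cases inq with
      | false =>
        simp only [Bool.not_false, if_true, if_false] at *
        rw [hr, pvNet_cons]
        simp
        ring
      | true =>
        simp only [Bool.not_true, if_false] at *
        rw [hr]
        simp

lemma pvG_h : ∀ (rest : List (List Char)) (seg : List Char) (prev : Option Char) (inq : Bool),
    pvG prev inq (seg :: rest)
      = (if inq then 0 else pvNet seg) + pvH (decide (seg.getLast?.or prev = some '\\')) inq rest := by
  intro rest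
  induction rest with
  | nil => intro seg prev inq; rw [pvG]; simp [pvG, pvH]
  | cons seg2 rest2 ih =>
    intro seg prev inq
    rw [pvG]
    rw [ih seg2 (some '"') (if seg.getLast?.or prev = some '\\' then inq else !inq)]
    rw [pvH]
    have hor : (decide (seg2.getLast?.or (some '"') = some '\\')) = (decide (seg2.getLast? = some '\\')) :=
      decide_eq_decide.mpr (pvOrQuote _)
    rw [hor]
    by_cases he : seg.getLast?.or prev = some '\\'
    · rw [if_pos he, decide_eq_true he]
      simp
    · rw [if_neg he, decide_eq_false he]
      cases inq <;> simp <;> ring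

lemma pvEs_append : ∀ (xs : List (List Char)) (b : Bool) (ys : List (List Char)),
    pvEs b (xs ++ ys) = pvEs b xs + pvEs (if xs.length % 2 = 0 then b else !b) ys := by
  intro xs
  induction xs with
  | nil => intro b ys; simp [pvEs]
  | cons x t ih =>
    intro b ys
    simp only [List.cons_append, pvEs, List.length_cons]
    rw [ih (!b) ys]
    have h2 : ¬((t.length + 1) % 2 = 0) ↔ (t.length % 2 = 0) := by omega
    by_cases hp : t.length % 2 = 0
    · rw [if_pos hp, if_neg (h2.mpr hp)]
      ring
    · rw [if_neg hp, if_pos (by omega : (t.length + 1) % 2 = 0)]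
      simp only [Bool.not_not]
      ring

lemma pvGetLastNeg (xs : List (List Char)) :
    PySem.List.pyGet? xs (-1) = xs.getLast? := by
  cases xs with
  | nil => rfl
  | cons x t =>
    simp [PySem.List.pyGet?, PySem.List.pyIdx?, List.getLast?_eq_getElem?]

lemma pvEndswithBS (l : List Char) :
    PySem.Chars.endswith l ['\\'] = decide (l.getLast? = some '\\') := by
  by_cases h : l.getLast? = some '\\'
  · obtain ⟨t, rfl⟩ := List.getLast?_eq_some_iff.mp h
    have h2 := (PySem.Chars.endswith_iff (s := t ++ ['\\']) (p := ['\\'])).mpr ⟨t, rfl⟩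
    simp [h2, h]
  · have h2 : ¬ (['\\'] <:+ l) := by
      rintro ⟨t, rfl⟩; exact h List.getLast?_concat
    have h3 : PySem.Chars.endswith l ['\\'] ≠ true := fun hc => h2 ((PySem.Chars.endswith_iff _ _).mp hc)
    simp [Bool.eq_false_iff.mpr h3, h]

lemma pvNet_append (a b : List Char) : pvNet (a ++ b) = pvNet a + pvNet b := by
  simp [pvNet, List.count_append]
  ring

lemma pvNet_quote_cons (s : List Char) : pvNet ('"' :: s) = pvNet s := by
  simp [pvNet, List.count_cons]

lemma pvMerge_fold : ∀ (raw front : List (List Char)) (last : List Char),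
    pvEs true (raw.foldl
      (fun (parts : List (List Char)) (seg : List Char) =>
        match PySem.List.pyGet? parts (-1) with
        | some last =>
          if PySem.Chars.endswith last ['\\'] then
            parts.dropLast ++ [last ++ '"' :: seg]
          else parts ++ [seg]
        | none => parts ++ [seg])
      (front ++ [last]))
    = pvEs true (front ++ [last]) + pvH (decide (last.getLast? = some '\\')) (decide (front.length % 2 = 1)) raw := by
  intro raw
  induction raw with
  | nil => intro front last; simp [pvH]
  | cons seg rest ih =>
    intro front last
    rw [List.foldl_cons]
    by_cases he : last.getLast? = some '\\'
    · have hstep : (match PySem.List.pyGet? (front ++ [last]) (-1) with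
        | some last_1 =>
          if PySem.Chars.endswith last_1 ['\\'] then
            (front ++ [last]).dropLast ++ [last_1 ++ '"' :: seg]
          else front ++ [last] ++ [seg]
        | none => front ++ [last] ++ [seg]) = front ++ [last ++ '"' :: seg] := by
        simp [pvGetLastNeg, pvEndswithBS, he]
      rw [hstep, ih front (last ++ '"' :: seg)]
      rw [pvH]
      simp only [decide_eq_true he, if_true]
      have hl : (last ++ '"' :: seg).getLast? = seg.getLast?.or (some '"') := by
        rw [List.getLast?_append_cons]
        cases seg with
        | nil => simp
        | cons a b => rw [List.getLast?_cons_cons, Option.or_of_isSome (by simp)]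
      rw [hl]
      rw [decide_eq_decide.mpr (pvOrQuote seg.getLast?)]
      rw [pvEs_append front true [last ++ '"' :: seg], pvEs_append front true [last]]
      simp only [pvEs]
      rw [pvNet_append, pvNet_quote_cons]
      by_cases hp : front.length % 2 = 0
      · rw [if_pos hp]
        have h1 : ¬(front.length % 2 = 1) := by omega
        simp [h1]
        ring
      · rw [if_neg hp]
        have h1 : front.length % 2 = 1 := by omega
        simp [h1]
    · have hstep : (match PySem.List.pyGet? (front ++ [last]) (-1) with
        | some last_1 =>
          if PySem.Chars.endswith last_1 ['\\'] then
            (front ++ [last]).dropLast ++ [last_1 ++ '"' :: seg]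
          else front ++ [last] ++ [seg]
        | none => front ++ [last] ++ [seg]) = front ++ [last] ++ [seg] := by
        simp [pvGetLastNeg, pvEndswithBS, he]
      rw [hstep, ih (front ++ [last]) seg]
      rw [pvH]
      simp only [decide_eq_false he, Bool.false_eq_true, if_false]
      rw [pvEs_append (front ++ [last]) true [seg], pvEs_append front true [last]]
      simp only [pvEs, List.length_append, List.length_cons, List.length_nil]
      by_cases hp : front.length % 2 = 0
      · have h1 : ¬(front.length % 2 = 1) := by omega
        have h2 : ¬((front.length + (0 + 1)) % 2 = 0) := by omega
        have h3 : (front.length + 1) % 2 = 1 := by omega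
        simp [hp, h1, h2, h3]
      · have h1 : front.length % 2 = 1 := by omega
        have h2 : (front.length + (0 + 1)) % 2 = 0 := by omega
        have h3 : ¬((front.length + 1) % 2 = 1) := by omega
        simp [hp, h1, h2, h3]
        ring

lemma pvCountGo : ∀ (fuel : Nat) (l : List Char) (acc : Nat) (c : Char), l.length ≤ fuel →
    PySem.Chars.count.go [c] fuel l acc = acc + l.count c := by
  intro fuel
  induction fuel with
  | zero =>
    intro l acc c h
    have hl : l = [] := by cases l <;> simp_all
    subst hl
    rw [PySem.Chars.count.go.eq_def]
    simp
  | succ f ihf =>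
    intro l acc c h
    cases l with
    | nil => rw [PySem.Chars.count.go.eq_def]; simp
    | cons hd tl =>
      rw [PySem.Chars.count.go.eq_def]
      simp only [List.isPrefixOf, List.length_cons] at *
      by_cases hc : hd = c
      · simp only [hc, BEq.rfl, Bool.true_and]
        have := ihf tl (acc + 1) c (by omega)
        simp [this]
        omega
      · have hbe : (c == hd) = false := beq_eq_false_iff_ne.mpr (Ne.symm hc)
        simp [hbe, ihf tl acc c (by omega), List.count_cons]
        exact hc

lemma pvCountSingle (l : List Char) (c : Char) : PySem.Chars.count l [c] = l.count c := by
  rw [PySem.Chars.count]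
  simp only [List.isEmpty_cons]
  exact (pvCountGo l.length l 0 c le_rfl).trans (by simp)

def pvConsHead (x : List Char) : List (List Char) → List (List Char)
  | [] => [x]
  | s :: ss => (x ++ s) :: ss

lemma pvSplitGo : ∀ (fuel : Nat) (l cur : List Char) (acc : List (List Char)), l.length ≤ fuel →
    PySem.Chars.splitOn.go ['"'] fuel l cur acc = acc.reverse ++ pvConsHead cur.reverse (pvSplit l) := by
  intro fuel
  induction fuel with
  | zero =>
    intro l cur acc h
    have hl : l = [] := by cases l <;> simp_all
    subst hl
    rw [PySem.Chars.splitOn.go.eq_def]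
    simp [pvSplit, pvConsHead]
  | succ f ihf =>
    intro l cur acc h
    cases l with
    | nil => rw [PySem.Chars.splitOn.go.eq_def]; simp [pvSplit, pvConsHead]
    | cons hd tl =>
      rw [PySem.Chars.splitOn.go.eq_def]
      simp only [List.isPrefixOf, List.length_cons] at *
      by_cases hc : hd = '"'
      · simp only [hc, BEq.rfl, Bool.true_and]
        have := ihf tl [] (cur.reverse :: acc) (by omega)
        simp [this, pvSplit, pvConsHead]
        obtain ⟨s, ss, hs⟩ : ∃ s ss, pvSplit tl = s :: ss := by
          rcases hx : pvSplit tl with _ | ⟨s, ss⟩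
          · exact absurd hx (pvSplit_ne_nil tl)
          · exact ⟨s, ss, rfl⟩
        simp [hs, pvConsHead]
      · have hbe : (('"' : Char) == hd) = false := beq_eq_false_iff_ne.mpr (Ne.symm hc)
        simp only [hbe, Bool.false_and, Bool.false_eq_true, if_false]
        have := ihf tl (hd :: cur) acc (by omega)
        simp only [List.reverse_cons] at this
        rw [this]
        simp only [pvSplit, if_neg hc]
        obtain ⟨s, ss, hs⟩ : ∃ s ss, pvSplit tl = s :: ss := by
          rcases hx : pvSplit tl with _ | ⟨s, ss⟩
          · exact absurd hx (pvSplit_ne_nil tl)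
          · exact ⟨s, ss, rfl⟩
        simp [hs, pvConsHead]

lemma pvSplitOn_eq (l : List Char) : PySem.Chars.splitOn l ['"'] = pvSplit l := by
  rw [PySem.Chars.splitOn]
  rw [pvSplitGo (l.length + 1) l [] [] (by omega)]
  obtain ⟨s, ss, hs⟩ : ∃ s ss, pvSplit l = s :: ss := by
    rcases hx : pvSplit l with _ | ⟨s, ss⟩
    · exact absurd hx (pvSplit_ne_nil l)
    · exact ⟨s, ss, rfl⟩
  simp [hs, pvConsHead]

lemma pvEven_fold : ∀ (parts : List (List Char)) (s : Nat) (acc : Int),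
    ((PySem.List.enumerate parts (s : Int)).foldl
      (fun (acc : Int) (p : Int × List Char) =>
        if PySem.Int.mod p.1 2 = 0 then
          acc + ((PySem.Chars.count p.2 ['['] : Int) - (PySem.Chars.count p.2 [']'] : Int))
        else acc)
      acc) = acc + pvEs (decide (s % 2 = 0)) parts := by
  intro parts
  induction parts with
  | nil => intro s acc; simp [PySem.List.enumerate, pvEs]
  | cons p ps ih =>
    intro s acc
    rw [PySem.List.enumerate_cons, List.foldl_cons]
    have hcast : ((s : Int) + 1) = (((s + 1 : Nat) : Nat) : Int) := by push_cast; ring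
    have hmod : PySem.Int.mod (s : Int) 2 = ((s % 2 : Nat) : Int) := by
      have h2 : (2 : Int) = ((2 : Nat) : Int) := by norm_num
      rw [h2, PySem.Int.mod_natCast]
    have hnet : ((PySem.Chars.count p ['['] : Int) - (PySem.Chars.count p [']'] : Int)) = pvNet p := by
      rw [pvCountSingle, pvCountSingle]; rfl
    rw [hcast, ih (s + 1)]
    simp only [pvEs]
    by_cases hp : s % 2 = 0
    · have hm : PySem.Int.mod (s : Int) 2 = 0 := by rw [hmod, hp]; rfl
      have hp1 : ¬((s + 1) % 2 = 0) := by omega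
      rw [if_pos hm]
      simp [hp, hp1, hnet]
      ring
    · have hm : ¬(PySem.Int.mod (s : Int) 2 = 0) := by
        rw [hmod]
        have : s % 2 = 1 := by omega
        rw [this]
        norm_num
      have hp1 : (s + 1) % 2 = 0 := by omega
      rw [if_neg hm]
      simp [hp, hp1]


-- ===== VERDICT (by name: the statement is the Claim_ definition above) =====
theorem count_unquoted_brackets_py_spec : Claim_equal_count_unquoted_brackets_py := by
  intro line _
  unfold Spec_count_unquoted_brackets_py
  obtain ⟨r, rt, hr⟩ : ∃ r rt, pvSplit line.toList = r :: rt := by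
    rcases hx : pvSplit line.toList with _ | ⟨r, rt⟩
    · exact absurd hx (pvSplit_ne_nil line.toList)
    · exact ⟨r, rt, rfl⟩
  have hA : count_unquoted_brackets_py line = pvNetRec none false line.toList := by
    have h := pvA_fold line.toList line.toList [] 0 false rfl
    simpa [count_unquoted_brackets_py] using h
  have hB : count_unquoted_brackets_py_alt line
      = pvNet r + pvH (decide (r.getLast? = some '\\')) false rt := by
    have hfold := pvMerge_fold rt [] r
    have heven := pvEven_fold
      (rt.foldl
        (fun (parts : List (List Char)) (seg : List Char) =>
          match PySem.List.pyGet? parts (-1) with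
          | some last =>
            if PySem.Chars.endswith last ['\\'] then
              parts.dropLast ++ [last ++ '"' :: seg]
            else parts ++ [seg]
          | none => parts ++ [seg])
        ([] ++ [r])) 0 0
    simp only [Nat.cast_zero, Nat.zero_mod, decide_true] at heven
    simp only [count_unquoted_brackets_py_alt, pvSplitOn_eq, hr, List.foldl_cons]
    rw [show (match PySem.List.pyGet? ([] : List (List Char)) (-1) with
      | some last =>
        if PySem.Chars.endswith last ['\\'] then
          ([] : List (List Char)).dropLast ++ [last ++ '"' :: r]
        else [] ++ [r]
      | none => [] ++ [r]) = [] ++ [r] from rfl]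
    rw [heven, hfold]
    simp [pvEs]
  rw [hA, pvNetRec_g, hr, pvG_h rt r none false, hB]
  simp
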